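-- pv_equiv track=rewrite | github.com/joominchul/codingTestJoo | Lv.2 도넛과 막대 그래프.py | inAout
-- ===== SOURCE A (Python) =====
-- def putEdge(Dict, key, value): #딕셔너리에 엣지 추가
--     if Dict.get(key): #키가 딕셔너리에 있으면 값을 추가
--         temp = Dict.get(key)
--         temp.append(value)
--         Dict[key] = temp
--     else: #키가 딕셔너리에 없으면 업데이트
--         Dict.update({key: [value]})
--
-- def inAout(edges):
--     In = {} #입력 딕셔너리. 키 엣지에 입력으로 들어오는 엣지를 값으로 설정
--     Out = {} #출력 딕셔너리. 키 엣지에서 출력으로 내보내는 엣지를 값으로 설정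
--     Max = 0 #엣지의 개수 변수
--     for i in edges:
--         putEdge(In, i[1], i[0])
--         putEdge(Out, i[0], i[1])
--         if Max <max(i): #엣지 개수 업데이트
--             Max = max(i)
--     return In, Out, Max
-- ===== SOURCE B (Python) =====
-- def inAout(edges):
--     in_keys = list(dict.fromkeys(e[1] for e in edges))
--     out_keys = list(dict.fromkeys(e[0] for e in edges))
--     In = {k: [e[0] for e in edges if e[1] == k] for k in in_keys}
--     Out = {k: [e[1] for e in edges if e[0] == k] for k in out_keys}
--     Max = max([0] + [x for e in edges for x in e])
--     return In, Out, Max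
-- ===== Notes on version B (the rewrite author's own statement) =====
-- stated objective: alternative
-- what changed: Replaces A's single pass that mutates two dicts via putEdge and a running max with a dedup-then-group decomposition: first-occurrence key lists via dict.fromkeys, per-key filter comprehensions for the neighbor lists, and one max over the flattened edge list floored at 0.
import Mathlib
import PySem

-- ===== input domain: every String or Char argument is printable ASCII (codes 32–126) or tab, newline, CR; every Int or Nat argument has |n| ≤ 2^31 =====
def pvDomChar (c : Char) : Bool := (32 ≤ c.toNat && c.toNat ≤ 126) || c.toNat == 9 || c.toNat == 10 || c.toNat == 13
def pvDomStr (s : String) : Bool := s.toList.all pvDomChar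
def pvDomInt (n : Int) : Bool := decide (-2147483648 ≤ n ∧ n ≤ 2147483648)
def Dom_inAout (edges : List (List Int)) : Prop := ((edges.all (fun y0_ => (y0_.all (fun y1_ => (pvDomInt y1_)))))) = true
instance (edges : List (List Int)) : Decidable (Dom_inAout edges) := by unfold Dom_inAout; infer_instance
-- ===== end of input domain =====

-- B replaces A's single-pass mutate-two-dicts-and-a-running-max loop by a dedup-then-group
-- decomposition (first-occurrence key lists + per-key filter comprehensions + one flat max);
-- objective: alternative. Return-value equivalence only (A mutates nothing observable).

-- ===== PORT A =====
def putEdge (d : PySem.Dict Int (List Int)) (key value : Int) : PySem.Dict Int (List Int) :=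
  match d.get? key with
  | some temp =>
      if temp ≠ [] then d.insert key (temp ++ [value])  -- key present with a truthy (non-empty) list
      else d.update [(key, [value])]
  | none => d.update [(key, [value])]

def inAout (edges : List (List Int)) : (List (Int × List Int)) × (List (Int × List Int)) × Int :=
  let s := edges.foldl
    (fun (st : PySem.Dict Int (List Int) × PySem.Dict Int (List Int) × Int) i =>
      let In' := putEdge st.1 (PySem.List.pyGetD i 1 0) (PySem.List.pyGetD i 0 0)
      let Out' := putEdge st.2.1 (PySem.List.pyGetD i 0 0) (PySem.List.pyGetD i 1 0)
      let Max' := match PySem.List.max? i (fun y => y) with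
        | some m => if st.2.2 < m then m else st.2.2
        | none => st.2.2
      (In', Out', Max'))
    (PySem.Dict.empty, PySem.Dict.empty, 0)
  (s.1.items, s.2.1.items, s.2.2)

-- ===== PORT B =====
def inAout_alt (edges : List (List Int)) : (List (Int × List Int)) × (List (Int × List Int)) × Int :=
  let inKeys := PySem.List.dedup (edges.map (fun e => PySem.List.pyGetD e 1 0))
  let outKeys := PySem.List.dedup (edges.map (fun e => PySem.List.pyGetD e 0 0))
  let In := inKeys.map (fun k =>
    (k, (edges.filter (fun e => PySem.List.pyGetD e 1 0 == k)).map (fun e => PySem.List.pyGetD e 0 0)))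
  let Out := outKeys.map (fun k =>
    (k, (edges.filter (fun e => PySem.List.pyGetD e 0 0 == k)).map (fun e => PySem.List.pyGetD e 1 0)))
  let mx := match PySem.List.max? ((0 : Int) :: edges.flatMap (fun e => e)) (fun y => y) with
    | some m => m
    | none => 0
  (In, Out, mx)

-- ===== PRECONDITION & SPEC =====
-- Pre_ excludes exactly the inputs where Python A raises: an edge with fewer than two
-- entries makes the i[1] access an IndexError.
def Pre_inAout (edges : List (List Int)) : Prop := ∀ e ∈ edges, 2 ≤ e.length
instance (edges : List (List Int)) : Decidable (Pre_inAout edges) := by unfold Pre_inAout; infer_instance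
def pvWitness_inAout : List (List Int) := [[2, 3], [4, 3], [3, 1]]
def Spec_inAout (edges : List (List Int)) (out : (List (Int × List Int)) × (List (Int × List Int)) × Int) : Prop := out = inAout_alt edges
instance (edges : List (List Int)) (out : (List (Int × List Int)) × (List (Int × List Int)) × Int) : Decidable (Spec_inAout edges out) := by unfold Spec_inAout; infer_instance

-- ===== CLAIM (what is proved, stated in full; the proofs are below) =====
def Claim_equal_inAout : Prop := ∀ (edges : List (List Int)), Dom_inAout edges → Pre_inAout edges → Spec_inAout edges (inAout edges)

-- ===== LEMMAS AND PROOFS =====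

-- A's putEdge is exactly a modify-with-default-[]-and-append.
theorem putEdge_eq_modify (d : PySem.Dict Int (List Int)) (k v : Int) :
    putEdge d k v = d.modify k [] (fun t => t ++ [v]) := by
  unfold putEdge
  cases h : d.get? k with
  | none =>
    simp [PySem.Dict.modify, PySem.Dict.update, PySem.Dict.getD_eq_get?_getD, h]
  | some temp =>
    by_cases ht : temp = []
    · subst ht
      simp [PySem.Dict.modify, PySem.Dict.update, PySem.Dict.getD_eq_get?_getD, h]
    · simp [ht, PySem.Dict.modify, PySem.Dict.getD_eq_get?_getD, h]

-- A's three intertwined accumulators are three independent folds.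
theorem loopA_split (edges : List (List Int))
    (dIn dOut : PySem.Dict Int (List Int)) (M : Int) :
    edges.foldl
      (fun (st : PySem.Dict Int (List Int) × PySem.Dict Int (List Int) × Int) i =>
        let In' := putEdge st.1 (PySem.List.pyGetD i 1 0) (PySem.List.pyGetD i 0 0)
        let Out' := putEdge st.2.1 (PySem.List.pyGetD i 0 0) (PySem.List.pyGetD i 1 0)
        let Max' := match PySem.List.max? i (fun y => y) with
          | some m => if st.2.2 < m then m else st.2.2
          | none => st.2.2
        (In', Out', Max')) (dIn, dOut, M)
    = (edges.foldl (fun d i => putEdge d (PySem.List.pyGetD i 1 0) (PySem.List.pyGetD i 0 0)) dIn,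
       edges.foldl (fun d i => putEdge d (PySem.List.pyGetD i 0 0) (PySem.List.pyGetD i 1 0)) dOut,
       edges.foldl (fun M i => match PySem.List.max? i (fun y => y) with
          | some m => if M < m then m else M
          | none => M) M) := by
  induction edges generalizing dIn dOut M with
  | nil => rfl
  | cons e t ih => simp only [List.foldl_cons]; exact ih _ _ _

-- A's running max over per-edge maxima is the running max over the flattened list.
theorem loopA_max (edges : List (List Int)) (M : Int) :
    edges.foldl (fun M i => match PySem.List.max? i (fun y => y) with
        | some m => if M < m then m else M
        | none => M) M
    = (edges.flatMap (fun e => e)).foldl max M := by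
  induction edges generalizing M with
  | nil => rfl
  | cons e t ih =>
    cases e with
    | nil => simpa using ih M
    | cons x xs =>
      simp only [List.foldl_cons, List.flatMap_cons, List.foldl_append,
        PySem.List.max?_id_cons]
      rw [ih]
      congr 1
      rw [show List.foldl max (max M x) xs = max M (List.foldl max x xs) from List.foldl_assoc]
      rcases le_or_gt (xs.foldl max x) M with hle | hlt
      · simp [not_lt.mpr hle, max_eq_left hle]
      · simp [hlt, max_eq_right hlt.le]

-- A putEdge-fold, as an items list, is dedup of the keys paired with filtered groups.
theorem foldl_putEdge_items (edges : List (List Int)) (k1 k0 : List Int → Int) :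
    (edges.foldl (fun d i => putEdge d (k1 i) (k0 i)) PySem.Dict.empty).items
    = (PySem.List.dedup (edges.map k1)).map (fun c =>
        (c, (edges.filter (fun e => k1 e == c)).map k0)) := by
  have hrw : (edges.foldl (fun d i => putEdge d (k1 i) (k0 i)) PySem.Dict.empty)
      = edges.foldl (fun d i => d.modify (k1 i) [] (fun t => t ++ [k0 i])) PySem.Dict.empty := by
    simp only [putEdge_eq_modify]
  rw [hrw]
  set d := edges.foldl (fun d i => d.modify (k1 i) [] (fun t => t ++ [k0 i])) PySem.Dict.empty with hd
  have hkeys : d.keys = PySem.List.dedup (edges.map k1) := by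
    rw [hd, PySem.Dict.keys_foldl_modify_key]
    simp [PySem.Set.update_nil_left]
  have hnodup : d.keys.Nodup := by
    rw [hkeys]; exact PySem.List.nodup_dedup _
  have hgetD : ∀ c, d.getD c [] = (edges.filter (fun e => k1 e == c)).map k0 := by
    intro c
    have hmap : d = (edges.map (fun e => (k1 e, k0 e))).foldl
        (fun d p => d.modify p.1 [] (fun t => t ++ [p.2])) PySem.Dict.empty := by
      rw [hd, List.foldl_map]
    rw [hmap, PySem.Dict.getD_foldl_modify_append]
    simp [List.filter_map, List.map_map, Function.comp_def]
  rw [PySem.Dict.items_eq_map_keys d hnodup [], hkeys]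
  exact List.map_congr_left (fun c _ => by rw [hgetD c])

-- ===== VERDICT (by name: the statement is the Claim_ definition above) =====
theorem inAout_spec : Claim_equal_inAout := by
  unfold Claim_equal_inAout
  intro edges _ _
  unfold Spec_inAout inAout inAout_alt
  simp only [loopA_split, loopA_max, foldl_putEdge_items, PySem.List.max?_id_cons]
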